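-- pv_equiv track=rewrite | github.com/xuthus/py-slurpers | slurpers.py | strip_illegal_chars_capitalize
-- ===== SOURCE A (Python) =====
-- def strip_illegal_chars_capitalize(s: str):
--     res = ''
--     cap = False
--     for c in s:
--         if c in ['-', '.']:
--             cap = True
--         else:
--             res = res + (c.upper() if cap else c)
--             cap = False
--     return res
-- ===== SOURCE B (Python) =====
-- def strip_illegal_chars_capitalize(s: str):
--     # tokenize into segments separated by hyphen/dot delimiters, then uppercase the first
--     # character of every segment after the first and concatenate
--     segs = []
--     cur = ''
--     for c in s:
--         if c in '-.':
--             segs.append(cur)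
--             cur = ''
--         else:
--             cur = cur + c
--     segs.append(cur)
--     return segs[0] + ''.join(p[:1].upper() + p[1:] for p in segs[1:])
-- ===== Notes on version B (the rewrite author's own statement) =====
-- stated objective: alternative
-- what changed: Replaces the char-by-char capitalize-flag scan with a tokenize-then-transform structure: split the string into segments at hyphen/dot delimiters, keep the first segment, uppercase the first character of each later segment and concatenate.
import Mathlib
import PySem

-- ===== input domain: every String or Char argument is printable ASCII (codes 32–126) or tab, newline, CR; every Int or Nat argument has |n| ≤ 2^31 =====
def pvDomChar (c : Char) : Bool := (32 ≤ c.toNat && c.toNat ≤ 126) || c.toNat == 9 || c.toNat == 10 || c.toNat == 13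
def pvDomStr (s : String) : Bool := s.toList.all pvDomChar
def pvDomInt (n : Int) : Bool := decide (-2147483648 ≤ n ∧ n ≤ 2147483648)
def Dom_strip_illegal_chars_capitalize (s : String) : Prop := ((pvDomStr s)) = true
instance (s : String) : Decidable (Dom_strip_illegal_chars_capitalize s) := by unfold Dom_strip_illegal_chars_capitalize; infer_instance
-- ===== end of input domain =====

-- B replaces A's char-by-char capitalize-flag scan with a tokenize-into-segments-then-transform
-- structure (alternative decomposition, same cost). Ports are exact on the ASCII domain
-- (str.upper of a single ASCII char is PySem.Chars.upper).


-- ===== PORT A =====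
-- the for-loop over s with state (res, cap)
def pvGoA : List Char → List Char → Bool → List Char
  | [], res, _ => res
  | c :: cs, res, cap =>
    if c = '-' ∨ c = '.' then pvGoA cs res true
    else pvGoA cs (res ++ (if cap then PySem.Chars.upper [c] else [c])) false

def strip_illegal_chars_capitalize (s : String) : String :=
  String.mk (pvGoA s.toList [] false)

-- ===== PORT B =====
-- the tokenizing loop over s with state (segs, cur); returns segs + [cur]
def pvGoB : List Char → List (List Char) → List Char → List (List Char)
  | [], segs, cur => segs ++ [cur]
  | c :: cs, segs, cur =>
    if c = '-' ∨ c = '.' then pvGoB cs (segs ++ [cur]) []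
    else pvGoB cs segs (cur ++ [c])

-- p[:1].upper() + p[1:]
def pvCapFirst (p : List Char) : List Char :=
  PySem.Chars.upper (p.take 1) ++ p.drop 1

def strip_illegal_chars_capitalize_alt (s : String) : String :=
  let segs := pvGoB s.toList [] []
  String.mk (segs.headI ++ PySem.Chars.join [] ((segs.drop 1).map pvCapFirst))

-- ===== PRECONDITION & SPEC =====
def Spec_strip_illegal_chars_capitalize (s : String) (out : String) : Prop := out = strip_illegal_chars_capitalize_alt s
instance (s : String) (out : String) : Decidable (Spec_strip_illegal_chars_capitalize s out) := by unfold Spec_strip_illegal_chars_capitalize; infer_instance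

-- ===== CLAIM (what is proved, stated in full; the proofs are below) =====
def Claim_equal_strip_illegal_chars_capitalize : Prop := ∀ (s : String), Dom_strip_illegal_chars_capitalize s → Spec_strip_illegal_chars_capitalize s (strip_illegal_chars_capitalize s)

-- ===== LEMMAS AND PROOFS =====

-- proof-side: the segments of cs as (first segment, later segments)
def pvSegs : List Char → List Char × List (List Char)
  | [] => ([], [])
  | c :: cs =>
    let r := pvSegs cs
    if c = '-' ∨ c = '.' then ([], r.1 :: r.2) else (c :: r.1, r.2)

-- proof-side: what A's loop appends to res, given the current flag
def pvG : List Char → Bool → List Char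
  | [], _ => []
  | c :: cs, cap =>
    if c = '-' ∨ c = '.' then pvG cs true
    else (if cap then PySem.Chars.upperChar c else c) :: pvG cs false

theorem pvGoA_eq (cs : List Char) : ∀ res cap, pvGoA cs res cap = res ++ pvG cs cap := by
  induction cs with
  | nil => simp [pvGoA, pvG]
  | cons c cs ih =>
    intro res cap
    by_cases h : c = '-' ∨ c = '.' <;>
      simp [pvGoA, pvG, h, ih, PySem.Chars.upper] <;> cases cap <;> simp

theorem pvGoB_eq (cs : List Char) : ∀ acc cur,
    pvGoB cs acc cur = acc ++ (cur ++ (pvSegs cs).1) :: (pvSegs cs).2 := by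
  induction cs with
  | nil => simp [pvGoB, pvSegs]
  | cons c cs ih =>
    intro acc cur
    by_cases h : c = '-' ∨ c = '.' <;> simp [pvGoB, pvSegs, h, ih]

theorem pvG_eq (cs : List Char) : ∀ cap,
    pvG cs cap = (if cap then pvCapFirst (pvSegs cs).1 else (pvSegs cs).1)
      ++ ((pvSegs cs).2.map pvCapFirst).flatten := by
  induction cs with
  | nil => intro cap; cases cap <;> simp [pvG, pvSegs, pvCapFirst, PySem.Chars.upper]
  | cons c cs ih =>
    intro cap
    by_cases h : c = '-' ∨ c = '.'
    · cases cap <;> simp [pvG, pvSegs, h, ih, pvCapFirst, PySem.Chars.upper]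
    · cases cap <;>
        simp [pvG, pvSegs, h, ih, pvCapFirst, PySem.Chars.upper]

theorem pvJoin_empty (xss : List (List Char)) :
    PySem.Chars.join [] xss = xss.flatten := by
  induction xss with
  | nil => simp [PySem.Chars.join, List.intercalate]
  | cons xs xss ih =>
    cases xss <;>
      simp_all [PySem.Chars.join, List.intercalate, List.intersperse, List.flatten]

-- ===== VERDICT (by name: the statement is the Claim_ definition above) =====
theorem strip_illegal_chars_capitalize_spec : Claim_equal_strip_illegal_chars_capitalize := by
  intro s _
  unfold Spec_strip_illegal_chars_capitalize strip_illegal_chars_capitalize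
    strip_illegal_chars_capitalize_alt
  simp [pvGoA_eq, pvGoB_eq, pvG_eq, pvJoin_empty]
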